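-- pv_equiv track=rewrite | github.com/kekVector/TryPygameGame | func.py | sides_coord
-- ===== SOURCE A (Python) =====
-- def sides_coord(list_coord):
--     max_y = [list_coord[0][1], 0]
--     max_x = [list_coord[0][0], 0]
--     min_y = [list_coord[0][1], 0]
--     min_x = [list_coord[0][0], 0]
--     for count, elem in enumerate(list_coord):
--         if elem[0] > max_x[0]:
--             max_x[0] = elem[0]
--             max_x[1] = count
--         if elem[0] < min_x[0]:
--             min_x[0] = elem[0]
--             min_x[1] = count
--         if elem[1] < max_y[0]:
--             max_y[0] = elem[1]
--             max_y[1] = count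
--         if elem[1] > min_y[0]:
--             min_y[0] = elem[1]
--             min_y[1] = count
--
--     return max_x[1], min_x[1], max_y[1], min_y[1]
-- ===== SOURCE B (Python) =====
-- def sides_coord(list_coord):
--     idx = range(len(list_coord))
--     kx = lambda i: list_coord[i][0]
--     ky = lambda i: list_coord[i][1]
--     return max(idx, key=kx), min(idx, key=kx), min(idx, key=ky), max(idx, key=ky)
-- ===== Notes on version B (the rewrite author's own statement) =====
-- stated objective: simpler
-- what changed: Replaces the single four-accumulator enumerate loop with four independent first-extremal max/min selections over indices keyed by the relevant coordinate.
import Mathlib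
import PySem

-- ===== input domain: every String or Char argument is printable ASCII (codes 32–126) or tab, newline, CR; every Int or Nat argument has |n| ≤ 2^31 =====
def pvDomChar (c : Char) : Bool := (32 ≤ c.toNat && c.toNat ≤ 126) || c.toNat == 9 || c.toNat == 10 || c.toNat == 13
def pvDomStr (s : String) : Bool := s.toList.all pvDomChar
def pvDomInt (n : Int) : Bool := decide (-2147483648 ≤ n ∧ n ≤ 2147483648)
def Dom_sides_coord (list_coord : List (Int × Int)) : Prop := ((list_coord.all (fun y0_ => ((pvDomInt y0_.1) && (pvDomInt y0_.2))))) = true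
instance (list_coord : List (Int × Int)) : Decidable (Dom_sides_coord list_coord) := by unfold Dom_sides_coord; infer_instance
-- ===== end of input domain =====

-- B replaces A's single four-accumulator loop over enumerate with four independent
-- first-extremal max/min selections over indices keyed by the relevant coordinate (simpler decomposition).

-- ===== PORT A =====
-- A's loop keeps four [value, index] accumulators initialised from list_coord[0];
-- each of the four independent `if`s is ported on its own component.
def sides_coord (list_coord : List (Int × Int)) : Int × Int × Int × Int :=
  let h := PySem.List.pyGetD list_coord 0 (0, 0)
  let st := (PySem.List.enumerate list_coord 0).foldl
    (fun (acc : (Int × Int) × (Int × Int) × (Int × Int) × (Int × Int)) ce =>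
      (if ce.2.2 < acc.1.1 then (ce.2.2, ce.1) else acc.1,          -- max_y
       if ce.2.1 > acc.2.1.1 then (ce.2.1, ce.1) else acc.2.1,      -- max_x
       if ce.2.2 > acc.2.2.1.1 then (ce.2.2, ce.1) else acc.2.2.1,  -- min_y
       if ce.2.1 < acc.2.2.2.1 then (ce.2.1, ce.1) else acc.2.2.2)) -- min_x
    ((h.2, 0), (h.1, 0), (h.2, 0), (h.1, 0))
  (st.2.1.2, st.2.2.2.2, st.1.2, st.2.2.1.2)

-- ===== PORT B =====
-- Python max(iterable, key) / min(iterable, key): first element, then strict improvement.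
def pvMaxBy (key : Int → Int) : List Int → Int
  | [] => 0
  | i :: r => r.foldl (fun b j => if key j > key b then j else b) i

def pvMinBy (key : Int → Int) : List Int → Int
  | [] => 0
  | i :: r => r.foldl (fun b j => if key j < key b then j else b) i

def sides_coord_alt (list_coord : List (Int × Int)) : Int × Int × Int × Int :=
  let idx := PySem.List.pyRange 0 list_coord.length 1
  let kx := fun (i : Int) => (PySem.List.pyGetD list_coord i (0, 0)).1
  let ky := fun (i : Int) => (PySem.List.pyGetD list_coord i (0, 0)).2
  (pvMaxBy kx idx, pvMinBy kx idx, pvMinBy ky idx, pvMaxBy ky idx)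

-- ===== PRECONDITION & SPEC =====
-- A evaluates list_coord[0], so the empty list raises IndexError; Pre_ excludes it.
def Pre_sides_coord (list_coord : List (Int × Int)) : Prop := list_coord ≠ []
instance (list_coord : List (Int × Int)) : Decidable (Pre_sides_coord list_coord) := by unfold Pre_sides_coord; infer_instance
def pvWitness_sides_coord : (List (Int × Int)) := [(1, 2), (3, 0)]

def Spec_sides_coord (list_coord : List (Int × Int)) (out : Int × Int × Int × Int) : Prop := out = sides_coord_alt list_coord
instance (list_coord : List (Int × Int)) (out : Int × Int × Int × Int) : Decidable (Spec_sides_coord list_coord out) := by unfold Spec_sides_coord; infer_instance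

-- ===== CLAIM (what is proved, stated in full; the proofs are below) =====
def Claim_equal_sides_coord : Prop := ∀ (list_coord : List (Int × Int)), Dom_sides_coord list_coord → Pre_sides_coord list_coord → Spec_sides_coord list_coord (sides_coord list_coord)

-- ===== LEMMAS AND PROOFS =====

-- a fold tracking (best value, best index) equals (key of best index, best index)
theorem pv_fold_track_gt (key : Int → Int) :
    ∀ (l : List Int) (b : Int),
      l.foldl (fun (acc : Int × Int) j => if acc.1 < key j then (key j, j) else acc) (key b, b)
        = (key (l.foldl (fun b j => if key b < key j then j else b) b),
           l.foldl (fun b j => if key b < key j then j else b) b) := by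
  intro l
  induction l with
  | nil => intro b; simp
  | cons j r ih =>
      intro b
      simp only [List.foldl_cons]
      by_cases h : key b < key j <;> simp [h, ih]

theorem pv_fold_track_lt (key : Int → Int) :
    ∀ (l : List Int) (b : Int),
      l.foldl (fun (acc : Int × Int) j => if key j < acc.1 then (key j, j) else acc) (key b, b)
        = (key (l.foldl (fun b j => if key j < key b then j else b) b),
           l.foldl (fun b j => if key j < key b then j else b) b) := by
  intro l
  induction l with
  | nil => intro b; simp
  | cons j r ih =>
      intro b
      simp only [List.foldl_cons]
      by_cases h : key j < key b <;> simp [h, ih]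

-- a fold on a 4-tuple whose components are updated independently splits into 4 folds
theorem pv_fold4 {α : Type} (s1 s2 s3 s4 : Int × Int → α → Int × Int) :
    ∀ (l : List α) (a b c d : Int × Int),
      l.foldl (fun acc p => (s1 acc.1 p, s2 acc.2.1 p, s3 acc.2.2.1 p, s4 acc.2.2.2 p)) (a, b, c, d)
        = (l.foldl s1 a, l.foldl s2 b, l.foldl s3 c, l.foldl s4 d) := by
  intro l
  induction l with
  | nil => intro a b c d; simp
  | cons p r ih => intro a b c d; simp [ih]

-- ===== VERDICT (by name: the statement is the Claim_ definition above) =====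
theorem sides_coord_spec : Claim_equal_sides_coord := by
  intro lc _ hpre
  unfold Spec_sides_coord sides_coord sides_coord_alt
  have hn : (0 : Int) < lc.length := by
    cases lc with
    | nil => exact absurd rfl hpre
    | cons x xs => simp
  set kx : Int → Int := fun i => (PySem.List.pyGetD lc i (0, 0)).1 with hkx
  set ky : Int → Int := fun i => (PySem.List.pyGetD lc i (0, 0)).2 with hky
  rw [PySem.List.enumerate_eq_map_pyRange (d := (0, 0))]
  dsimp only [PySem.List.len_eq]
  rw [List.foldl_map]
  rw [PySem.List.pyRange_one_cons hn]
  simp only [List.foldl_cons]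
  rw [pv_fold4 (fun acc p => if ky p < acc.1 then (ky p, p) else acc)
        (fun acc p => if kx p > acc.1 then (kx p, p) else acc)
        (fun acc p => if ky p > acc.1 then (ky p, p) else acc)
        (fun acc p => if kx p < acc.1 then (kx p, p) else acc)]
  simp only [gt_iff_lt]
  rw [show (PySem.List.pyGetD lc 0 (0, 0)).2 = ky 0 from rfl,
      show (PySem.List.pyGetD lc 0 (0, 0)).1 = kx 0 from rfl]
  rw [if_neg (lt_irrefl (ky 0)), if_neg (lt_irrefl (kx 0))]
  rw [pv_fold_track_lt ky, pv_fold_track_gt kx, pv_fold_track_gt ky, pv_fold_track_lt kx]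
  simp [pvMaxBy, pvMinBy]
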